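-- pv_equiv track=rewrite | github.com/nehakathar1999/Shadowtrace | asset_discovery/intelligence/product_analysis.py | compliance_mapping
-- ===== SOURCE A (Python) =====
-- def compliance_mapping(service: str | None, title: str | None, severity: str | None = None) -> list[str]:
--     service_name = str(service or "").lower()
--     finding_title = str(title or "").lower()
--     mappings = {"OWASP Top 10", "ISO 27001 A.8.8", "ISO 27001 A.8.9"}
--
--     if any(token in finding_title for token in ("auth", "login", "credential", "access control", "idor")):
--         mappings.update({"OWASP A01 Broken Access Control", "PCI DSS 7.2", "PCI DSS 8.2"})
--     if any(token in finding_title for token in ("sql", "xss", "injection", "template injection")):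
--         mappings.update({"OWASP A05 Injection", "PCI DSS 6.2.4"})
--     if any(token in finding_title for token in ("tls", "cipher", "https", "cookie", "crypto")):
--         mappings.update({"OWASP A04 Cryptographic Failures", "PCI DSS 4.2.1"})
--     if any(token in finding_title for token in ("header", "misconfiguration", "debug", "backup", "server fingerprint")):
--         mappings.update({"OWASP A02 Security Misconfiguration", "PCI DSS 2.2.1"})
--     if service_name in {"ssh", "rdp", "smb", "ftp", "mysql", "postgresql", "redis"}:
--         mappings.add("CIS Control 12")
--     if str(severity or "").upper() == "CRITICAL":
--         mappings.add("ISO 27001 A.5.7")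
--
--     return sorted(mappings)
-- ===== SOURCE B (Python) =====
-- # Keyword->tags inverted index, matched by a single left-to-right scan of the
-- # title: at each position we look up the substring of each candidate keyword
-- # length in a hash table, instead of running a separate substring search per
-- # keyword as A does.
--
-- _ACCESS = ("OWASP A01 Broken Access Control", "PCI DSS 7.2", "PCI DSS 8.2")
-- _INJECT = ("OWASP A05 Injection", "PCI DSS 6.2.4")
-- _CRYPTO = ("OWASP A04 Cryptographic Failures", "PCI DSS 4.2.1")
-- _MISCONF = ("OWASP A02 Security Misconfiguration", "PCI DSS 2.2.1")
--
-- _TOKEN_TAGS = {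
--     "auth": _ACCESS, "login": _ACCESS, "credential": _ACCESS,
--     "access control": _ACCESS, "idor": _ACCESS,
--     "sql": _INJECT, "xss": _INJECT, "injection": _INJECT,
--     "template injection": _INJECT,
--     "tls": _CRYPTO, "cipher": _CRYPTO, "https": _CRYPTO,
--     "cookie": _CRYPTO, "crypto": _CRYPTO,
--     "header": _MISCONF, "misconfiguration": _MISCONF,
--     "debug": _MISCONF, "backup": _MISCONF,
--     "server fingerprint": _MISCONF,
-- }
--
-- # the distinct keyword lengths, ascending (== sorted({len(k) for k in _TOKEN_TAGS}))
-- _LENGTHS = (3, 4, 5, 6, 9, 10, 14, 16, 18)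
--
-- _SERVICE_TAGS = {s: ("CIS Control 12",)
--                  for s in ("ssh", "rdp", "smb", "ftp", "mysql", "postgresql", "redis")}
--
--
-- def compliance_mapping(service, title, severity=None):
--     text = str(title or "").lower()
--     tags = {"OWASP Top 10", "ISO 27001 A.8.8", "ISO 27001 A.8.9"}
--     for i in range(len(text)):
--         for n in _LENGTHS:
--             found = _TOKEN_TAGS.get(text[i:i + n])
--             if found:
--                 tags.update(found)
--     tags.update(_SERVICE_TAGS.get(str(service or "").lower(), ()))
--     if str(severity or "").upper() == "CRITICAL":
--         tags.add("ISO 27001 A.5.7")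
--     return sorted(tags)
-- ===== Notes on version B (the rewrite author's own statement) =====
-- stated objective: alternative
-- what changed: Replaces A's per-keyword substring searches (one 'token in title' scan per token) with an inverted keyword->tags hash index consulted during a single left-to-right scan of the title: at each position the substring of each candidate keyword length is looked up in the index, so the per-token search loops disappear; the service set and severity checks become one dict lookup and one comparison.
import Mathlib
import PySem

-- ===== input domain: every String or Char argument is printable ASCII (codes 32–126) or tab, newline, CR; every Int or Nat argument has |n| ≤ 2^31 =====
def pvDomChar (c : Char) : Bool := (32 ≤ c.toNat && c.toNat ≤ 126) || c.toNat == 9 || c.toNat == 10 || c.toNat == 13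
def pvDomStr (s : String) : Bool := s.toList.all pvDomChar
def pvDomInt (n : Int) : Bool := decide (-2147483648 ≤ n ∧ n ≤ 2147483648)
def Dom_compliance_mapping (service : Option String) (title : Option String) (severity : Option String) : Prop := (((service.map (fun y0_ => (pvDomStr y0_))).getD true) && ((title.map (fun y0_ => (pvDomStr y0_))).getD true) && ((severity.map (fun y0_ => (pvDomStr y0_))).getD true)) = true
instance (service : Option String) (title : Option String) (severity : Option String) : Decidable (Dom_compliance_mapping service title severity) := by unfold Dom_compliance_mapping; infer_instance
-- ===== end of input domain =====

-- B replaces A's per-keyword substring searches with an inverted keyword->tags index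
-- consulted while scanning the title once, substring-by-length hash lookups (objective: alternative).


-- ===== PORT A =====
-- any(token in s for token in toks)
def pyAnyIn (toks : List String) (s : String) : Bool :=
  toks.any (fun token => PySem.Str.isIn token s)

def compliance_mapping (service : Option String) (title : Option String) (severity : Option String) : List String :=
  let service_name := PySem.Str.lower (service.getD "")
  let finding_title := PySem.Str.lower (title.getD "")
  let mappings : PySem.Set String :=
    PySem.Set.ofList ["OWASP Top 10", "ISO 27001 A.8.8", "ISO 27001 A.8.9"]
  let mappings := if pyAnyIn ["auth", "login", "credential", "access control", "idor"] finding_title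
    then PySem.Set.update mappings ["OWASP A01 Broken Access Control", "PCI DSS 7.2", "PCI DSS 8.2"] else mappings
  let mappings := if pyAnyIn ["sql", "xss", "injection", "template injection"] finding_title
    then PySem.Set.update mappings ["OWASP A05 Injection", "PCI DSS 6.2.4"] else mappings
  let mappings := if pyAnyIn ["tls", "cipher", "https", "cookie", "crypto"] finding_title
    then PySem.Set.update mappings ["OWASP A04 Cryptographic Failures", "PCI DSS 4.2.1"] else mappings
  let mappings := if pyAnyIn ["header", "misconfiguration", "debug", "backup", "server fingerprint"] finding_title
    then PySem.Set.update mappings ["OWASP A02 Security Misconfiguration", "PCI DSS 2.2.1"] else mappings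
  let mappings := if PySem.Set.contains (PySem.Set.ofList ["ssh", "rdp", "smb", "ftp", "mysql", "postgresql", "redis"]) service_name
    then PySem.Set.add mappings "CIS Control 12" else mappings
  let mappings := if PySem.Str.upper (severity.getD "") == "CRITICAL"
    then PySem.Set.add mappings "ISO 27001 A.5.7" else mappings
  PySem.List.sorted mappings (fun x => x) false

-- ===== PORT B =====
-- module-level constants of Source B
def accessTags : List String := ["OWASP A01 Broken Access Control", "PCI DSS 7.2", "PCI DSS 8.2"]
def injectTags : List String := ["OWASP A05 Injection", "PCI DSS 6.2.4"]
def cryptoTags : List String := ["OWASP A04 Cryptographic Failures", "PCI DSS 4.2.1"]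
def misconfTags : List String := ["OWASP A02 Security Misconfiguration", "PCI DSS 2.2.1"]

def tokenTagsList : List (String × List String) :=
  [("auth", accessTags), ("login", accessTags), ("credential", accessTags),
   ("access control", accessTags), ("idor", accessTags),
   ("sql", injectTags), ("xss", injectTags), ("injection", injectTags),
   ("template injection", injectTags),
   ("tls", cryptoTags), ("cipher", cryptoTags), ("https", cryptoTags),
   ("cookie", cryptoTags), ("crypto", cryptoTags),
   ("header", misconfTags), ("misconfiguration", misconfTags),
   ("debug", misconfTags), ("backup", misconfTags),
   ("server fingerprint", misconfTags)]

def tokenTags : PySem.Dict String (List String) := PySem.Dict.ofList tokenTagsList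

-- the distinct keyword lengths, ascending (Source B's precomputed _LENGTHS tuple)
def lengthsB : List Int := [3, 4, 5, 6, 9, 10, 14, 16, 18]

def serviceTags : PySem.Dict String (List String) :=
  PySem.Dict.ofList ((["ssh", "rdp", "smb", "ftp", "mysql", "postgresql", "redis"] : List String).map
    (fun s => (s, ["CIS Control 12"])))

def compliance_mapping_alt (service : Option String) (title : Option String) (severity : Option String) : List String :=
  let text := PySem.Str.lower (title.getD "")
  let tags : PySem.Set String :=
    PySem.Set.ofList ["OWASP Top 10", "ISO 27001 A.8.8", "ISO 27001 A.8.9"]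
  let tags := (PySem.List.pyRange 0 (PySem.Str.len text) 1).foldl (fun tags i =>
      lengthsB.foldl (fun tags n =>
        match PySem.Dict.get? tokenTags (PySem.Str.slice text (some i) (some (i + n))) with
        | some found => PySem.Set.update tags found
        | none => tags) tags) tags
  let tags := PySem.Set.update tags (PySem.Dict.getD serviceTags (PySem.Str.lower (service.getD "")) [])
  let tags := if PySem.Str.upper (severity.getD "") == "CRITICAL"
    then PySem.Set.add tags "ISO 27001 A.5.7" else tags
  PySem.List.sorted tags (fun x => x) false

-- ===== PRECONDITION & SPEC =====
def Spec_compliance_mapping (service : Option String) (title : Option String) (severity : Option String) (out : List String) : Prop := out = compliance_mapping_alt service title severity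
instance (service : Option String) (title : Option String) (severity : Option String) (out : List String) : Decidable (Spec_compliance_mapping service title severity out) := by unfold Spec_compliance_mapping; infer_instance

-- ===== CLAIM (what is proved, stated in full; the proofs are below) =====
def Claim_equal_compliance_mapping : Prop := ∀ (service : Option String) (title : Option String) (severity : Option String), Dom_compliance_mapping service title severity → Spec_compliance_mapping service title severity (compliance_mapping service title severity)

-- ===== LEMMAS AND PROOFS =====

-- a token hit of B's scan, abstracted: some dict keyword occurs in the text
def ScanHit (text : String) (x : String) : Prop :=
  ∃ tok ts, PySem.Dict.get? tokenTags tok = some ts ∧ PySem.Str.isIn tok text = true ∧ x ∈ ts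

-- generic: membership through a foldl whose step adds exactly the P-elements
theorem mem_foldl_step {α : Type} (g : PySem.Set String → α → PySem.Set String) (P : α → String → Prop)
    (h : ∀ s a x, x ∈ g s a ↔ x ∈ s ∨ P a x) :
    ∀ (l : List α) (s : PySem.Set String) (x : String), x ∈ l.foldl g s ↔ x ∈ s ∨ ∃ a ∈ l, P a x := by
  intro l
  induction l with
  | nil => simp
  | cons a l ih =>
    intro s x
    simp only [List.foldl_cons, ih, h, List.mem_cons]
    constructor
    · rintro ((hs | hp) | ⟨b, hb, hpb⟩)
      · exact Or.inl hs
      · exact Or.inr ⟨a, Or.inl rfl, hp⟩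
      · exact Or.inr ⟨b, Or.inr hb, hpb⟩
    · rintro (hs | ⟨b, (rfl | hb), hpb⟩)
      · exact Or.inl (Or.inl hs)
      · exact Or.inl (Or.inr hpb)
      · exact Or.inr ⟨b, hb, hpb⟩

theorem nodup_foldl_step {α : Type} (g : PySem.Set String → α → PySem.Set String)
    (h : ∀ s a, s.Nodup → (g s a).Nodup) :
    ∀ (l : List α) (s : PySem.Set String), s.Nodup → (l.foldl g s).Nodup := by
  intro l
  induction l with
  | nil => exact fun s hs => hs
  | cons a l ih => exact fun s hs => ih _ (h s a hs)

theorem mem_ite_update (c : Prop) [Decidable c] (s : PySem.Set String) (l : List String) (x : String) :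
    x ∈ (if c then PySem.Set.update s l else s) ↔ x ∈ s ∨ (c ∧ x ∈ l) := by
  split <;> simp_all [PySem.Set.mem_update]

theorem mem_ite_add (c : Prop) [Decidable c] (s : PySem.Set String) (y x : String) :
    x ∈ (if c then PySem.Set.add s y else s) ↔ x ∈ s ∨ (c ∧ x = y) := by
  split <;> simp_all [PySem.Set.mem_add]

theorem nodup_ite_update (c : Prop) [Decidable c] (s : PySem.Set String) (l : List String)
    (h : s.Nodup) : (if c then PySem.Set.update s l else s).Nodup := by
  split
  · exact PySem.Set.nodup_update _ _ h
  · exact h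

theorem nodup_ite_add (c : Prop) [Decidable c] (s : PySem.Set String) (y : String)
    (h : s.Nodup) : (if c then PySem.Set.add s y else s).Nodup := by
  split
  · exact PySem.Set.nodup_add _ _ h
  · exact h

-- first-match association lookup only returns stored pairs
theorem dictGet?_mem {κ ν : Type} [BEq κ] [LawfulBEq κ] (ps : List (κ × ν)) (k : κ) (v : ν)
    (h : (PySem.Dict.mk ps).get? k = some v) : (k, v) ∈ ps := by
  induction ps with
  | nil => simp [PySem.Dict.get?] at h
  | cons p rest ih =>
    rw [show (p : κ × ν) = (p.1, p.2) from rfl, PySem.Dict.get?_mk_cons] at h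
    by_cases hk : (p.1 == k) = true
    · simp only [hk, if_true, Option.some.injEq] at h
      have hk' : k = p.1 := (eq_of_beq hk).symm
      subst hk'
      subst h
      exact List.mem_cons_self
    · simp only [hk] at h
      exact List.mem_cons_of_mem _ (ih h)

theorem tokenTags_eq : tokenTags = PySem.Dict.mk tokenTagsList := by decide

theorem serviceTags_eq : serviceTags = PySem.Dict.mk
    ((["ssh", "rdp", "smb", "ftp", "mysql", "postgresql", "redis"] : List String).map
      (fun s => (s, ["CIS Control 12"]))) := by decide

-- every stored keyword is nonempty and has its length in the length table
theorem tokenTagsList_facts : ∀ p ∈ tokenTagsList, p.1.toList ≠ [] ∧ (p.1.toList.length : Int) ∈ lengthsB := by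
  decide

-- each stored pair belongs to exactly one of A's four keyword groups
theorem tokenTagsList_cases (tok : String) (ts : List String) (h : (tok, ts) ∈ tokenTagsList) :
    (tok ∈ (["auth", "login", "credential", "access control", "idor"] : List String) ∧ ts = accessTags) ∨
    (tok ∈ (["sql", "xss", "injection", "template injection"] : List String) ∧ ts = injectTags) ∨
    (tok ∈ (["tls", "cipher", "https", "cookie", "crypto"] : List String) ∧ ts = cryptoTags) ∨
    (tok ∈ (["header", "misconfiguration", "debug", "backup", "server fingerprint"] : List String) ∧ ts = misconfTags) := by
  fin_cases h <;> decide

theorem lengthsB_pos : ∀ n ∈ lengthsB, (0 : Int) < n := by decide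

theorem or_congr_iff_of_iff {a b c : Prop} (h : b ↔ c) : (a ∨ b) ↔ (a ∨ c) := or_congr_right h

theorem getD_eq_get? (d : PySem.Dict String (List String)) (k : String) :
    PySem.Dict.getD d k [] = (PySem.Dict.get? d k).getD [] := rfl

-- B's scan finds a keyword iff it is a substring of the text
theorem scan_mem (text : String) (s : PySem.Set String) (x : String) :
    x ∈ (PySem.List.pyRange 0 (PySem.Str.len text) 1).foldl (fun tags i =>
        lengthsB.foldl (fun tags n =>
          match PySem.Dict.get? tokenTags (PySem.Str.slice text (some i) (some (i + n))) with
          | some found => PySem.Set.update tags found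
          | none => tags) tags) s
      ↔ x ∈ s ∨ ScanHit text x := by
  rw [mem_foldl_step _
      (fun i x => ∃ n ∈ lengthsB, ∃ ts,
        PySem.Dict.get? tokenTags (PySem.Str.slice text (some i) (some (i + n))) = some ts ∧ x ∈ ts)
      (fun s i x => by
        rw [mem_foldl_step _
            (fun n x => ∃ ts,
              PySem.Dict.get? tokenTags (PySem.Str.slice text (some i) (some (i + n))) = some ts ∧ x ∈ ts)
            (fun s n x => by
              cases hg : PySem.Dict.get? tokenTags (PySem.Str.slice text (some i) (some (i + n))) with
              | none => simp [hg]
              | some found => simp [hg, PySem.Set.mem_update])])]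
  apply or_congr_iff_of_iff
  constructor
  · rintro ⟨i, hi, n, hn, ts, hget, hx⟩
    obtain ⟨hi0, _⟩ := PySem.List.mem_pyRange_one.mp hi
    have hn0 : (0 : Int) ≤ n := le_of_lt (lengthsB_pos n hn)
    refine ⟨PySem.Str.slice text (some i) (some (i + n)), ts, hget, ?_, hx⟩
    rw [PySem.Str.isIn_eq]
    apply (PySem.Chars.exists_prefix_drop_iff_isIn _ _).mp
    refine ⟨i.toNat, ?_⟩
    rw [PySem.Str.toList_slice, PySem.Chars.slice_eq_listSlice,
      PySem.List.slice_toNat _ hi0 (by omega)]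
    exact List.take_prefix _ _
  · rintro ⟨tok, ts, hget, hin, hx⟩
    have hp := dictGet?_mem tokenTagsList tok ts (by rwa [← tokenTags_eq])
    obtain ⟨hne, hlen⟩ := tokenTagsList_facts (tok, ts) hp
    obtain ⟨pre, suf, heq⟩ := (PySem.Str.isIn_iff_infix tok text).mp hin
    have hlen' : text.toList.length = pre.length + tok.toList.length + suf.length := by
      rw [← heq]; simp only [List.length_append]
    have htokpos : 0 < tok.toList.length := List.length_pos_iff.mpr hne
    refine ⟨(pre.length : Int), ?_, (tok.toList.length : Int), hlen, ts, ?_, hx⟩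
    · rw [PySem.List.mem_pyRange_one, PySem.Str.len_eq]
      constructor
      · positivity
      · omega
    · have hsl : PySem.Str.slice text (some (pre.length : Int))
          (some ((pre.length : Int) + (tok.toList.length : Int))) = tok := by
        apply String.toList_inj.mp
        rw [PySem.Str.toList_slice, PySem.Chars.slice_eq_listSlice]
        have : ((pre.length : Int) + (tok.toList.length : Int))
            = ((pre.length + tok.toList.length : Nat) : Int) := by push_cast; ring
        rw [this, PySem.List.slice_natCast]
        rw [← heq, List.append_assoc, List.drop_left]
        have harith : pre.length + tok.toList.length - pre.length = tok.toList.length := by omega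
        rw [harith, List.take_left]
      rw [hsl]
      exact hget

-- ScanHit decomposes into A's four any-token group flags
theorem scanHit_iff (text : String) (x : String) :
    ScanHit text x ↔
      (pyAnyIn ["auth", "login", "credential", "access control", "idor"] text = true ∧ x ∈ accessTags) ∨
      (pyAnyIn ["sql", "xss", "injection", "template injection"] text = true ∧ x ∈ injectTags) ∨
      (pyAnyIn ["tls", "cipher", "https", "cookie", "crypto"] text = true ∧ x ∈ cryptoTags) ∨
      (pyAnyIn ["header", "misconfiguration", "debug", "backup", "server fingerprint"] text = true ∧ x ∈ misconfTags) := by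
  simp only [pyAnyIn, List.any_eq_true]
  constructor
  · rintro ⟨tok, ts, hget, hin, hx⟩
    have hp := dictGet?_mem tokenTagsList tok ts (by rwa [← tokenTags_eq])
    rcases tokenTagsList_cases tok ts hp with ⟨hm, rfl⟩ | ⟨hm, rfl⟩ | ⟨hm, rfl⟩ | ⟨hm, rfl⟩
    · exact Or.inl ⟨⟨tok, hm, hin⟩, hx⟩
    · exact Or.inr (Or.inl ⟨⟨tok, hm, hin⟩, hx⟩)
    · exact Or.inr (Or.inr (Or.inl ⟨⟨tok, hm, hin⟩, hx⟩))
    · exact Or.inr (Or.inr (Or.inr ⟨⟨tok, hm, hin⟩, hx⟩))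
  · rintro (⟨⟨tok, hm, hin⟩, hx⟩ | ⟨⟨tok, hm, hin⟩, hx⟩ | ⟨⟨tok, hm, hin⟩, hx⟩ | ⟨⟨tok, hm, hin⟩, hx⟩)
    · exact ⟨tok, accessTags, by fin_cases hm <;> decide, hin, hx⟩
    · exact ⟨tok, injectTags, by fin_cases hm <;> decide, hin, hx⟩
    · exact ⟨tok, cryptoTags, by fin_cases hm <;> decide, hin, hx⟩
    · exact ⟨tok, misconfTags, by fin_cases hm <;> decide, hin, hx⟩

-- the service lookup table holds CIS Control 12 exactly at the seven risky services
theorem serviceTags_mem (sname : String) (x : String) :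
    x ∈ PySem.Dict.getD serviceTags sname [] ↔
      (sname ∈ (["ssh", "rdp", "smb", "ftp", "mysql", "postgresql", "redis"] : List String) ∧ x = "CIS Control 12") := by
  rw [getD_eq_get?]
  cases hg : PySem.Dict.get? serviceTags sname with
  | none =>
    simp only [Option.getD_none, List.not_mem_nil, false_iff, not_and]
    intro hm
    exfalso
    have : PySem.Dict.get? serviceTags sname = some ["CIS Control 12"] := by
      fin_cases hm <;> decide
    rw [hg] at this
    simp at this
  | some v =>
    have hp := dictGet?_mem _ sname v (by rwa [← serviceTags_eq])
    simp only [List.mem_map] at hp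
    obtain ⟨sv, hsv, heq⟩ := hp
    have h1 : sv = sname := congrArg Prod.fst heq
    have h2 : (["CIS Control 12"] : List String) = v := congrArg Prod.snd heq
    subst h1
    rw [← h2]
    simp [hsv]

theorem or_shuffle (B a b c d e f : Prop) :
    ((((((B ∨ a) ∨ b) ∨ c) ∨ d) ∨ e) ∨ f) ↔ (((B ∨ a ∨ b ∨ c ∨ d) ∨ e) ∨ f) := by
  tauto

-- ===== VERDICT (by name: the statement is the Claim_ definition above) =====
theorem compliance_mapping_spec : Claim_equal_compliance_mapping := by
  intro service title severity _
  unfold Spec_compliance_mapping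
  simp only [compliance_mapping, compliance_mapping_alt]
  apply PySem.List.sorted_eq_sorted_of_perm _ _ _ (fun a b h => h)
  refine (List.perm_ext_iff_of_nodup ?_ ?_).mpr ?_
  · -- A's set has no duplicates
    exact nodup_ite_add _ _ _ (nodup_ite_add _ _ _ (nodup_ite_update _ _ _
      (nodup_ite_update _ _ _ (nodup_ite_update _ _ _ (nodup_ite_update _ _ _
        (PySem.Set.nodup_ofList _))))))
  · -- B's set has no duplicates
    refine nodup_ite_add _ _ _ (PySem.Set.nodup_update _ _ ?_)
    refine nodup_foldl_step _ (fun s i hs => ?_) _ _ (PySem.Set.nodup_ofList _)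
    refine nodup_foldl_step _ (fun s n hs => ?_) _ _ hs
    cases PySem.Dict.get? tokenTags (PySem.Str.slice (PySem.Str.lower (title.getD "")) (some i) (some (i + n))) with
    | none => exact hs
    | some found => exact PySem.Set.nodup_update _ _ hs
  · -- same members
    intro x
    simp only [mem_ite_add, mem_ite_update, PySem.Set.mem_update, scan_mem, scanHit_iff,
      serviceTags_mem, PySem.Set.contains_iff, PySem.Set.mem_ofList,
      accessTags, injectTags, cryptoTags, misconfTags]
    exact or_shuffle _ _ _ _ _ _ _
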